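-- pv_equiv track=rewrite | github.com/PedroA25/pedro-ifpi | lista5_dot/Q10_L5.py | maior_soma
-- ===== SOURCE A (Python) =====
-- def maior_soma(n):
--     if type(n) != list:
--         return Exception
--     if len(n) == 0:
--         return Exception
--     for i in n:
--         if type(i) != int:
--             return Exception
--     d = {}
--     for i in n:
--         if i not in d:
--             d[i] = 1
--         else:
--             d[i] += 1
--     l = []
--     for i in d:
--         if d[i] > 1 :
--             l.append(i)
--     l1 = []
--     for i in l:
--         l1.append(i+i)
--     return max(l1)
-- ===== SOURCE B (Python) =====
-- def maior_soma(n):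
--     if type(n) != list:
--         return Exception
--     if len(n) == 0:
--         return Exception
--     for i in n:
--         if type(i) != int:
--             return Exception
--     s = sorted(n)
--     dups = []
--     for i in range(1, len(s)):
--         if s[i] == s[i - 1]:
--             dups.append(s[i])
--     return 2 * max(dups)
-- ===== Notes on version B (the rewrite author's own statement) =====
-- stated objective: alternative
-- what changed: A's count-dict plus key-filter plus doubling passes are replaced by sorting a copy of the list and collecting values that equal their left neighbour, returning twice their maximum.
-- outside the precondition, e.g. on maior_soma([1, 2, 3]): A raises ValueError, B raises ValueError; on maior_soma([5]): A raises ValueError, B raises ValueError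
import Mathlib
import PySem

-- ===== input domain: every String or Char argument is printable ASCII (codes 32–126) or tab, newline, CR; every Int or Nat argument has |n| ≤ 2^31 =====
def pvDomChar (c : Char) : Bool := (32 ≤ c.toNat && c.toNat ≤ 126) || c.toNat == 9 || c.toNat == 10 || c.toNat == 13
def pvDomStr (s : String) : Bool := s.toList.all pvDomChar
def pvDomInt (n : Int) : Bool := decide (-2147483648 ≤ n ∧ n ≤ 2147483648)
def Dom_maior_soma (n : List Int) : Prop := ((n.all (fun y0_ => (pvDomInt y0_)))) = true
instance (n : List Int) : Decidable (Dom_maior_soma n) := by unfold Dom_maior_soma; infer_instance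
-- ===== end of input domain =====

-- B replaces A's count-dict + filter + map passes by a sort-then-adjacent-scan (collect s[i] when s[i]==s[i-1], return 2*max); objective: alternative.

-- ===== PORT A =====
def maior_soma (n : List Int) : Int :=
  let d : PySem.Dict Int Int := n.foldl (fun d i =>
      if d.contains i = false then d.insert i 1 else d.modify i 0 (fun x => x + 1))
    PySem.Dict.empty
  let l : List Int := d.keys.foldl (fun l i => if d.getD i 0 > 1 then l ++ [i] else l) []
  let l1 : List Int := l.foldl (fun l1 i => l1 ++ [i + i]) []
  (PySem.List.max? l1 (fun y => y)).getD 0   -- max(l1); Pre_ guarantees l1 ≠ [] (else Python raises ValueError)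

-- ===== PORT B =====
def maior_soma_alt (n : List Int) : Int :=
  let s := PySem.List.sorted n (fun x => x) false
  let dups : List Int := (PySem.List.pyRange 1 (PySem.List.len s) 1).foldl
      (fun acc i => if PySem.List.pyGetD s i 0 = PySem.List.pyGetD s (i - 1) 0
                    then acc ++ [PySem.List.pyGetD s i 0] else acc) []
  2 * (PySem.List.max? dups (fun y => y)).getD 0  -- 2 * max(dups); Pre_ guarantees dups ≠ []

-- ===== PRECONDITION & SPEC =====
-- Pre_ excludes the empty list, on which A returns the Exception class itself (not an int; B does the same),
-- and duplicate-free lists, on which both A and B raise ValueError from max() applied to an empty list.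
def Pre_maior_soma (n : List Int) : Prop := ∃ x ∈ n, 2 ≤ n.count x
instance (n : List Int) : Decidable (Pre_maior_soma n) := by unfold Pre_maior_soma; infer_instance
def pvWitness_maior_soma : List Int := [1, 2, 1]

def Spec_maior_soma (n : List Int) (out : Int) : Prop := out = maior_soma_alt n
instance (n : List Int) (out : Int) : Decidable (Spec_maior_soma n out) := by unfold Spec_maior_soma; infer_instance

-- ===== CLAIM (what is proved, stated in full; the proofs are below) =====
def Claim_equal_maior_soma : Prop := ∀ (n : List Int), Dom_maior_soma n → Pre_maior_soma n → Spec_maior_soma n (maior_soma n)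

-- ===== LEMMAS AND PROOFS =====

-- A's doubled-duplicates list, exactly as the port of A computes it
def pvL1 (n : List Int) : List Int :=
  let d : PySem.Dict Int Int := n.foldl (fun d i =>
      if d.contains i = false then d.insert i 1 else d.modify i 0 (fun x => x + 1))
    PySem.Dict.empty
  let l : List Int := d.keys.foldl (fun l i => if d.getD i 0 > 1 then l ++ [i] else l) []
  l.foldl (fun l1 i => l1 ++ [i + i]) []

-- B's duplicates list, exactly as the port of B computes it
def pvDups (n : List Int) : List Int :=
  let s := PySem.List.sorted n (fun x => x) false
  (PySem.List.pyRange 1 (PySem.List.len s) 1).foldl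
      (fun acc i => if PySem.List.pyGetD s i 0 = PySem.List.pyGetD s (i - 1) 0
                    then acc ++ [PySem.List.pyGetD s i 0] else acc) []

theorem maior_soma_eq_max_pvL1 (n : List Int) :
    maior_soma n = (PySem.List.max? (pvL1 n) (fun y => y)).getD 0 := rfl

theorem maior_soma_alt_eq_max_pvDups (n : List Int) :
    maior_soma_alt n = 2 * (PySem.List.max? (pvDups n) (fun y => y)).getD 0 := rfl

-- A's counting loop (insert-1-or-increment) is Counter(n)
theorem countLoop_eq_counter (n : List Int) :
    n.foldl (fun d i => if d.contains i = false then d.insert i 1 else d.modify i 0 (fun x => x + 1))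
      PySem.Dict.empty = PySem.Dict.counter n := by
  rw [PySem.Dict.counter_eq_foldl]
  apply PySem.List.foldl_congr_mem
  intro d i _
  by_cases h : d.contains i = true
  · simp [h]
  · have h' : d.contains i = false := eq_false_of_ne_true h
    rw [if_pos h', PySem.Dict.modify, PySem.Dict.getD_of_not_contains _ _ h']
    norm_num

theorem mem_pvL1 (n : List Int) (x : Int) :
    x ∈ pvL1 n ↔ ∃ y, y ∈ n ∧ 2 ≤ n.count y ∧ x = y + y := by
  unfold pvL1
  rw [countLoop_eq_counter, PySem.List.foldl_append_singleton_eq_map]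
  have hfil : (PySem.Dict.counter n).keys.foldl
      (fun l i => if (PySem.Dict.counter n).getD i 0 > 1 then l ++ [i] else l) ([] : List Int)
      = [] ++ ((PySem.Dict.counter n).keys.filter
          (fun i => decide ((PySem.Dict.counter n).getD i 0 > 1))).map id := by
    rw [← PySem.List.foldl_append_if]
    apply PySem.List.foldl_congr_mem
    intro acc i _
    split_ifs with h1 h2 h2 <;> simp_all
    omega
  rw [hfil]
  simp only [List.map_id, List.nil_append, List.mem_map, List.mem_filter,
    PySem.Dict.keys_counter, PySem.Set.mem_ofList, PySem.Dict.getD_counter,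
    decide_eq_true_eq]
  constructor
  · rintro ⟨y, ⟨hy, hc⟩, rfl⟩
    exact ⟨y, hy, by exact_mod_cast hc, rfl⟩
  · rintro ⟨y, hy, hc, rfl⟩
    exact ⟨y, ⟨hy, by exact_mod_cast hc⟩, rfl⟩

-- a value of count ≥ 2 splits the list around its two occurrences
theorem two_le_count_split (s : List Int) (x : Int) (h : 2 ≤ s.count x) :
    ∃ u v w, s = u ++ x :: v ++ x :: w := by
  induction s with
  | nil => simp at h
  | cons a t ih =>
    rw [List.count_cons] at h
    by_cases hax : a = x
    · have hx : x ∈ t := by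
        rw [if_pos (by simp [hax])] at h
        exact List.count_pos_iff.mp (by omega)
      obtain ⟨v, w, rfl⟩ := List.mem_iff_append.mp hx
      exact ⟨[], v, w, by simp [hax]⟩
    · rw [if_neg (by simp [hax])] at h
      obtain ⟨u, v, w, rfl⟩ := ih (by omega)
      exact ⟨a :: u, v, w, rfl⟩

-- in a sorted list, the two occurrences can be taken adjacent
theorem sorted_xx (s : List Int) (x : Int) (hp : s.Pairwise (· ≤ ·)) (h : 2 ≤ s.count x) :
    ∃ u w, s = u ++ x :: x :: w := by
  obtain ⟨u, v, w, rfl⟩ := two_le_count_split _ _ h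
  cases v with
  | nil => exact ⟨u, w, by simp⟩
  | cons v0 v' =>
    simp only [List.pairwise_append, List.pairwise_cons, List.mem_append, List.mem_cons] at hp
    have hxv : x ≤ v0 := hp.1.2.1.1 v0 (Or.inl rfl)
    have hvx : v0 ≤ x := hp.2.2 v0 (Or.inr (Or.inr (Or.inl rfl))) x (Or.inl rfl)
    have hv0 : v0 = x := le_antisymm hvx hxv
    exact ⟨u, v' ++ x :: w, by simp [hv0]⟩

-- an adjacent equal pair forces count ≥ 2
theorem adj_count (s : List Int) (k : Nat) (h1 : 1 ≤ k) (hk : k < s.length)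
    (he : s[k] = s[k - 1]'(by omega)) : 2 ≤ s.count (s[k]) := by
  have hd1 := List.drop_eq_getElem_cons (l := s) (i := k - 1) (by omega)
  rw [show k - 1 + 1 = k from by omega] at hd1
  have hd2 := List.drop_eq_getElem_cons (l := s) (i := k) hk
  have hsub : (s[k - 1]'(by omega) :: s[k] :: s.drop (k + 1)).Sublist s := by
    have h0 := List.drop_sublist (k - 1) s
    rw [hd1, hd2] at h0
    exact h0
  calc 2 ≤ (s[k - 1]'(by omega) :: s[k] :: s.drop (k + 1)).count s[k] := by simp [he]
    _ ≤ s.count s[k] := hsub.count_le _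

-- the adjacent-duplicate scan of a sorted list collects exactly the values of count ≥ 2
theorem mem_scan (s : List Int) (hp : s.Pairwise (· ≤ ·)) (x : Int) :
    (x ∈ (PySem.List.pyRange 1 (↑s.length) 1).foldl
      (fun acc i => if PySem.List.pyGetD s i 0 = PySem.List.pyGetD s (i - 1) 0
                    then acc ++ [PySem.List.pyGetD s i 0] else acc) []) ↔ (x ∈ s ∧ 2 ≤ s.count x) := by
  have hfil : (PySem.List.pyRange 1 (↑s.length) 1).foldl
      (fun acc i => if PySem.List.pyGetD s i 0 = PySem.List.pyGetD s (i - 1) 0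
                    then acc ++ [PySem.List.pyGetD s i 0] else acc) []
      = [] ++ ((PySem.List.pyRange 1 (↑s.length) 1).filter
          (fun i => decide (PySem.List.pyGetD s i 0 = PySem.List.pyGetD s (i - 1) 0))).map
          (fun i => PySem.List.pyGetD s i 0) := by
    rw [← PySem.List.foldl_append_if]
    apply PySem.List.foldl_congr_mem
    intro acc i _
    split_ifs with h1 h2 h2 <;> simp_all
  rw [hfil]
  simp only [List.nil_append, List.mem_map, List.mem_filter, PySem.List.mem_pyRange_one,
    decide_eq_true_eq]
  constructor
  · rintro ⟨i, ⟨⟨hi1, hi2⟩, he⟩, rfl⟩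
    have hk2 : i.toNat < s.length := by omega
    have hk1 : 1 ≤ i.toNat := by omega
    have hg1 : PySem.List.pyGetD s i 0 = s[i.toNat] :=
      PySem.List.pyGetD_eq_getElem s 0 (by omega) (by omega)
    have hg2 : PySem.List.pyGetD s (i - 1) 0 = s[i.toNat - 1]'(by omega) := by
      rw [PySem.List.pyGetD_eq_getElem s 0 (by omega) (by omega)]
      congr 1
      omega
    rw [hg1, hg2] at he
    rw [hg1]
    exact ⟨List.mem_of_getElem rfl, adj_count s i.toNat hk1 hk2 he⟩
  · rintro ⟨hx, hc⟩
    obtain ⟨u, w, hsw⟩ := sorted_xx s x hp hc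
    have hlen : u.length + 1 < s.length := by rw [hsw]; simp
    have he1 : s[u.length + 1]'(by omega) = x := by
      have h0 : s[u.length + 1]? = some x := by
        rw [hsw, List.getElem?_append_right (by omega)]
        simp
      simpa [List.getElem?_eq_getElem (by omega : u.length + 1 < s.length)] using h0
    have he2 : s[u.length]'(by omega) = x := by
      have h0 : s[u.length]? = some x := by
        rw [hsw, List.getElem?_append_right (by omega)]
        simp
      simpa [List.getElem?_eq_getElem (by omega : u.length < s.length)] using h0
    have hg1 : PySem.List.pyGetD s ((u.length + 1 : Nat) : Int) 0 = s[u.length + 1]'(by omega) := by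
      rw [PySem.List.pyGetD_eq_getElem s 0 (by omega) (by push_cast; omega)]
      simp
    have hg2 : PySem.List.pyGetD s (((u.length + 1 : Nat) : Int) - 1) 0 = s[u.length]'(by omega) := by
      rw [PySem.List.pyGetD_eq_getElem s 0 (by omega) (by push_cast; omega)]
      congr 1
      omega
    exact ⟨((u.length + 1 : Nat) : Int), ⟨⟨by omega, by push_cast; omega⟩,
      by rw [hg1, hg2, he1, he2]⟩, by rw [hg1, he1]⟩

theorem mem_pvDups (n : List Int) (x : Int) :
    x ∈ pvDups n ↔ (x ∈ n ∧ 2 ≤ n.count x) := by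
  have hp : (PySem.List.sorted n (fun x => x) false).Pairwise (· ≤ ·) := by
    simpa using PySem.List.sorted_pairwise n (fun x => x)
  have hperm : (PySem.List.sorted n (fun x => x) false).Perm n := PySem.List.sorted_perm n _ _
  have hgoal : x ∈ pvDups n ↔ x ∈ (PySem.List.pyRange 1
        (((PySem.List.sorted n (fun x => x) false).length : Int)) 1).foldl
      (fun acc i => if PySem.List.pyGetD (PySem.List.sorted n (fun x => x) false) i 0
            = PySem.List.pyGetD (PySem.List.sorted n (fun x => x) false) (i - 1) 0
          then acc ++ [PySem.List.pyGetD (PySem.List.sorted n (fun x => x) false) i 0] else acc) [] := by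
    rw [pvDups, PySem.List.len_eq]
  rw [hgoal, mem_scan _ hp x, hperm.mem_iff, hperm.count_eq]

-- ===== VERDICT (by name: the statement is the Claim_ definition above) =====
theorem maior_soma_spec : Claim_equal_maior_soma := by
  intro n _ hpre
  obtain ⟨x0, hx0, hc0⟩ := hpre
  unfold Spec_maior_soma
  rw [maior_soma_eq_max_pvL1, maior_soma_alt_eq_max_pvDups]
  have h1 : x0 + x0 ∈ pvL1 n := (mem_pvL1 n _).mpr ⟨x0, hx0, hc0, rfl⟩
  have h2 : x0 ∈ pvDups n := (mem_pvDups n _).mpr ⟨hx0, hc0⟩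
  cases hm1 : PySem.List.max? (pvL1 n) (fun y => y) with
  | none => exact absurd ((PySem.List.max?_eq_none_iff _ _).mp hm1 ▸ h1) (List.not_mem_nil)
  | some m1 =>
    cases hm2 : PySem.List.max? (pvDups n) (fun y => y) with
    | none => exact absurd ((PySem.List.max?_eq_none_iff _ _).mp hm2 ▸ h2) (List.not_mem_nil)
    | some m2 =>
      obtain ⟨y, hy, hyc, hyeq⟩ := (mem_pvL1 n m1).mp (PySem.List.max?_mem hm1)
      obtain ⟨hm2n, hm2c⟩ := (mem_pvDups n m2).mp (PySem.List.max?_mem hm2)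
      have hle1 : y ≤ m2 := PySem.List.max?_isMax hm2 y ((mem_pvDups n y).mpr ⟨hy, hyc⟩)
      have hle2 : m2 + m2 ≤ m1 :=
        PySem.List.max?_isMax hm1 (m2 + m2) ((mem_pvL1 n _).mpr ⟨m2, hm2n, hm2c, rfl⟩)
      simp only [Option.getD_some]
      omega
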